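-- pv_equiv track=rewrite | github.com/kingroryg/CAA-universal | utils/helpers.py | model_name_format
-- ===== SOURCE A (Python) =====
-- def model_name_format(name: str) -> str:
--     """
--     Format the model name for display purposes.
--
--     Args:
--         name: The model path or name
--
--     Returns:
--         A formatted model name for display
--     """
--     name = name.lower()
--
--     # Llama 2 models
--     if "llama-2" in name or "llama2" in name:
--         is_chat = "chat" in name or "instruct" in name
--         is_7b = "7b" in name
--         is_13b = "13b" in name
--         is_70b = "70b" in name
--
--         size = "7B" if is_7b else "13B" if is_13b else "70B" if is_70b else "Unknown"
--         variant = "Chat" if is_chat else ""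
--
--         return f"Llama 2 {variant} {size}".strip()
--
--     # Llama 3 models
--     elif "llama-3" in name or "llama3" in name:
--         is_instruct = "instruct" in name
--         is_8b = "8b" in name
--         is_70b = "70b" in name
--
--         size = "8B" if is_8b else "70B" if is_70b else "Unknown"
--         variant = "Instruct" if is_instruct else ""
--
--         return f"Llama 3 {variant} {size}".strip()
--
--     # Gemma models
--     elif "gemma" in name:
--         is_instruct = "it" in name or "instruct" in name
--         is_2b = "2b" in name
--         is_7b = "7b" in name
--
--         size = "2B" if is_2b else "7B" if is_7b else "Unknown"
--         variant = "Instruct" if is_instruct else ""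
--
--         return f"Gemma {variant} {size}".strip()
--
--     # Mistral models
--     elif "mistral" in name and "mixtral" not in name:
--         is_instruct = "instruct" in name
--         is_7b = "7b" in name
--
--         size = "7B" if is_7b else "Unknown"
--         variant = "Instruct" if is_instruct else ""
--
--         return f"Mistral {variant} {size}".strip()
--
--     # Mixtral models
--     elif "mixtral" in name:
--         is_instruct = "instruct" in name
--         is_8x7b = "8x7b" in name
--
--         size = "8x7B" if is_8x7b else "Unknown"
--         variant = "Instruct" if is_instruct else ""
--
--         return f"Mixtral {variant} {size}".strip()
--
--     # For other models, just return a cleaned up version of the path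
--     else:
--         # Extract the model name from the path
--         if "/" in name:
--             name = name.split("/")[-1]
--
--         # Clean up common patterns
--         name = name.replace("-hf", "").replace("-v0.1", "")
--
--         # Capitalize words
--         return " ".join(word.capitalize() for word in name.split("-"))
-- ===== SOURCE B (Python) =====
-- # Different algorithm: one positional sweep over the string collects the set of
-- # matched keywords (multi-pattern scan); the answer is then a pure function of
-- # that set (no further substring searches), with the same path-cleanup fallback.
-- _KEYWORDS = ("llama-2", "llama2", "llama-3", "llama3", "gemma", "mistral",
--              "mixtral", "chat", "instruct", "it", "7b", "13b", "70b", "8b",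
--              "2b", "8x7b")
--
-- _SPECS = [
--     ("llama-2", "llama2", None, "Llama 2",
--      [("7b", "7B"), ("13b", "13B"), ("70b", "70B")], ("chat", "instruct"), "Chat"),
--     ("llama-3", "llama3", None, "Llama 3",
--      [("8b", "8B"), ("70b", "70B")], ("instruct",), "Instruct"),
--     ("gemma", "gemma", None, "Gemma",
--      [("2b", "2B"), ("7b", "7B")], ("it", "instruct"), "Instruct"),
--     ("mistral", "mistral", "mixtral", "Mistral",
--      [("7b", "7B")], ("instruct",), "Instruct"),
--     ("mixtral", "mixtral", None, "Mixtral",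
--      [("8x7b", "8x7B")], ("instruct",), "Instruct"),
-- ]
--
--
-- def model_name_format(name: str) -> str:
--     n = name.lower()
--     # single sweep: every keyword that starts at some position of n
--     hits = {kw for i in range(len(n)) for kw in _KEYWORDS if n.startswith(kw, i)}
--     for t1, t2, excl, label, sizes, vkeys, vlabel in _SPECS:
--         if (t1 in hits or t2 in hits) and excl not in hits:
--             size = next((s for sub, s in sizes if sub in hits), "Unknown")
--             variant = vlabel if any(k in hits for k in vkeys) else ""
--             return f"{label} {variant} {size}".strip()
--     # fallback: clean up the path
--     if "/" in n:
--         n = n.split("/")[-1]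
--     n = n.replace("-hf", "").replace("-v0.1", "")
--     return " ".join(word.capitalize() for word in n.split("-"))
-- ===== Notes on version B (the rewrite author's own statement) =====
-- stated objective: alternative
-- what changed: Instead of per-branch substring searches, B makes one positional sweep over the lowered string collecting the set of all matched keywords (a multi-pattern scan via startswith at each index), then decides label/size/variant purely by set membership against a spec table; only the path-cleanup fallback remains string code.
import Mathlib
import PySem

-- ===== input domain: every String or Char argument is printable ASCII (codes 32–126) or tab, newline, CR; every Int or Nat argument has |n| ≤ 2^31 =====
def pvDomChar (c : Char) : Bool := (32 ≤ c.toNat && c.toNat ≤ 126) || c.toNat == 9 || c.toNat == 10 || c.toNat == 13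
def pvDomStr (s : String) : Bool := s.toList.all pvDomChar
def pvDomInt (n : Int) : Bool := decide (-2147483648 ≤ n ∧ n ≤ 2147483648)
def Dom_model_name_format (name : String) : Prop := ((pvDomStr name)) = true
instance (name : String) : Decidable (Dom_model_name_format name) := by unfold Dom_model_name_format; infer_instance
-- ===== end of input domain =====

-- B replaces A's per-branch substring searches by one positional sweep collecting the
-- set of matched keywords, then pure set-membership decisions (objective: alternative).

-- word.capitalize(): first char uppercased, rest lowercased (exact on ASCII)
def pyCapitalize (s : String) : String :=
  match s.toList with
  | [] => s
  | c :: rest => String.ofList (PySem.Chars.upperChar c :: rest.map PySem.Chars.lowerChar)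

-- ===== PORT A =====
def model_name_format (name : String) : String :=
  let n := PySem.Str.lower name
  if PySem.Str.isIn "llama-2" n || PySem.Str.isIn "llama2" n then
    let is_chat := PySem.Str.isIn "chat" n || PySem.Str.isIn "instruct" n
    let is_7b := PySem.Str.isIn "7b" n
    let is_13b := PySem.Str.isIn "13b" n
    let is_70b := PySem.Str.isIn "70b" n
    let size := if is_7b then "7B" else if is_13b then "13B" else if is_70b then "70B" else "Unknown"
    let variant := if is_chat then "Chat" else ""
    PySem.Str.strip ("Llama 2 " ++ variant ++ " " ++ size)
  else if PySem.Str.isIn "llama-3" n || PySem.Str.isIn "llama3" n then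
    let is_instruct := PySem.Str.isIn "instruct" n
    let is_8b := PySem.Str.isIn "8b" n
    let is_70b := PySem.Str.isIn "70b" n
    let size := if is_8b then "8B" else if is_70b then "70B" else "Unknown"
    let variant := if is_instruct then "Instruct" else ""
    PySem.Str.strip ("Llama 3 " ++ variant ++ " " ++ size)
  else if PySem.Str.isIn "gemma" n then
    let is_instruct := PySem.Str.isIn "it" n || PySem.Str.isIn "instruct" n
    let is_2b := PySem.Str.isIn "2b" n
    let is_7b := PySem.Str.isIn "7b" n
    let size := if is_2b then "2B" else if is_7b then "7B" else "Unknown"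
    let variant := if is_instruct then "Instruct" else ""
    PySem.Str.strip ("Gemma " ++ variant ++ " " ++ size)
  else if PySem.Str.isIn "mistral" n && !PySem.Str.isIn "mixtral" n then
    let is_instruct := PySem.Str.isIn "instruct" n
    let is_7b := PySem.Str.isIn "7b" n
    let size := if is_7b then "7B" else "Unknown"
    let variant := if is_instruct then "Instruct" else ""
    PySem.Str.strip ("Mistral " ++ variant ++ " " ++ size)
  else if PySem.Str.isIn "mixtral" n then
    let is_instruct := PySem.Str.isIn "instruct" n
    let is_8x7b := PySem.Str.isIn "8x7b" n
    let size := if is_8x7b then "8x7B" else "Unknown"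
    let variant := if is_instruct then "Instruct" else ""
    PySem.Str.strip ("Mixtral " ++ variant ++ " " ++ size)
  else
    let n := if PySem.Str.isIn "/" n then ((PySem.Str.split? n "/").getD [n]).getLast! else n
    let n := PySem.Str.replace (PySem.Str.replace n "-hf" "") "-v0.1" ""
    PySem.Str.join " " (((PySem.Str.split? n "-").getD [n]).map pyCapitalize)

-- ===== PORT B =====
def pvKeywords : List String :=
  ["llama-2", "llama2", "llama-3", "llama3", "gemma", "mistral", "mixtral",
   "chat", "instruct", "it", "7b", "13b", "70b", "8b", "2b", "8x7b"]

-- inner part of the set comprehension: at position i, add every keyword starting there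
def pvScanAt (n : List Char) (acc : PySem.Set String) (i : Int) : PySem.Set String :=
  pvKeywords.foldl
    (fun acc kw => if PySem.Chars.startswith (n.drop i.toNat) kw.toList then PySem.Set.add acc kw else acc)
    acc

-- hits = {kw for i in range(len(n)) for kw in _KEYWORDS if n.startswith(kw, i)}
def pvHits (n : List Char) : PySem.Set String :=
  (PySem.List.pyRange 0 n.length 1).foldl (pvScanAt n) PySem.Set.empty

-- one spec: (trigger1, trigger2, optional exclusion, label, (keyword, size) pairs, variant keywords, variant label)
def pvSpecs : List (String × String × Option String × String × List (String × String) × List String × String) :=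
  [ ("llama-2", "llama2", none, "Llama 2", [("7b", "7B"), ("13b", "13B"), ("70b", "70B")], ["chat", "instruct"], "Chat"),
    ("llama-3", "llama3", none, "Llama 3", [("8b", "8B"), ("70b", "70B")], ["instruct"], "Instruct"),
    ("gemma", "gemma", none, "Gemma", [("2b", "2B"), ("7b", "7B")], ["it", "instruct"], "Instruct"),
    ("mistral", "mistral", some "mixtral", "Mistral", [("7b", "7B")], ["instruct"], "Instruct"),
    ("mixtral", "mixtral", none, "Mixtral", [("8x7b", "8x7B")], ["instruct"], "Instruct") ]

-- next((s for sub, s in sizes if sub in hits), "Unknown")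
def pvPickSize (h : PySem.Set String) : List (String × String) → String
  | [] => "Unknown"
  | (sub, lbl) :: rest => if PySem.Set.contains h sub then lbl else pvPickSize h rest

-- the fallback path-cleanup branch (identical lines in both Pythons)
def pvFallback (n : String) : String :=
  let n := if PySem.Str.isIn "/" n then ((PySem.Str.split? n "/").getD [n]).getLast! else n
  let n := PySem.Str.replace (PySem.Str.replace n "-hf" "") "-v0.1" ""
  PySem.Str.join " " (((PySem.Str.split? n "-").getD [n]).map pyCapitalize)

-- the for-loop over the spec table, deciding by membership in the hit set only
def pvRunSpecs (n : String) (h : PySem.Set String) :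
    List (String × String × Option String × String × List (String × String) × List String × String) → String
  | [] => pvFallback n
  | (t1, t2, excl, label, sizes, vkeys, vlabel) :: rest =>
    if (PySem.Set.contains h t1 || PySem.Set.contains h t2)
        && (match excl with | none => true | some e => !PySem.Set.contains h e) then
      let size := pvPickSize h sizes
      let variant := if vkeys.any (fun k => PySem.Set.contains h k) then vlabel else ""
      PySem.Str.strip (label ++ " " ++ variant ++ " " ++ size)
    else pvRunSpecs n h rest

def model_name_format_alt (name : String) : String :=
  let n := PySem.Str.lower name
  pvRunSpecs n (pvHits n.toList) pvSpecs

-- ===== PRECONDITION & SPEC =====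
def Spec_model_name_format (name : String) (out : String) : Prop := out = model_name_format_alt name
instance (name : String) (out : String) : Decidable (Spec_model_name_format name out) := by unfold Spec_model_name_format; infer_instance

-- ===== CLAIM (what is proved, stated in full; the proofs are below) =====
def Claim_equal_model_name_format : Prop := ∀ (name : String), Dom_model_name_format name → Spec_model_name_format name (model_name_format name)

-- ===== LEMMAS AND PROOFS =====

lemma mem_pvScanAt (n : List Char) (i : Int) (acc : PySem.Set String) (x : String) :
    x ∈ pvScanAt n acc i ↔
      x ∈ acc ∨ (x ∈ pvKeywords ∧ PySem.Chars.startswith (n.drop i.toNat) x.toList = true) := by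
  unfold pvScanAt
  generalize pvKeywords = ks
  induction ks generalizing acc with
  | nil => simp
  | cons kw rest ih =>
    simp only [List.foldl_cons]
    by_cases hsw : PySem.Chars.startswith (n.drop i.toNat) kw.toList = true
    · rw [if_pos hsw, ih]
      simp only [PySem.Set.mem_add, List.mem_cons]
      constructor
      · rintro ((h | rfl) | ⟨h1, h2⟩)
        · exact Or.inl h
        · exact Or.inr ⟨Or.inl rfl, hsw⟩
        · exact Or.inr ⟨Or.inr h1, h2⟩
      · rintro (h | ⟨(rfl | h1), h2⟩)
        · exact Or.inl (Or.inl h)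
        · exact Or.inl (Or.inr rfl)
        · exact Or.inr ⟨h1, h2⟩
    · rw [if_neg hsw, ih]
      simp only [List.mem_cons]
      constructor
      · rintro (h | ⟨h1, h2⟩)
        · exact Or.inl h
        · exact Or.inr ⟨Or.inr h1, h2⟩
      · rintro (h | ⟨(rfl | h1), h2⟩)
        · exact Or.inl h
        · exact absurd h2 hsw
        · exact Or.inr ⟨h1, h2⟩

lemma mem_foldl_pvScanAt (n : List Char) (is : List Int) (acc : PySem.Set String) (x : String) :
    x ∈ is.foldl (pvScanAt n) acc ↔
      x ∈ acc ∨ (x ∈ pvKeywords ∧ ∃ i ∈ is, PySem.Chars.startswith (n.drop i.toNat) x.toList = true) := by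
  induction is generalizing acc with
  | nil => simp
  | cons i rest ih =>
    simp only [List.foldl_cons]
    rw [ih, mem_pvScanAt]
    simp only [List.mem_cons]
    constructor
    · rintro ((h | ⟨h1, h2⟩) | ⟨h1, j, hj, h2⟩)
      · exact Or.inl h
      · exact Or.inr ⟨h1, i, Or.inl rfl, h2⟩
      · exact Or.inr ⟨h1, j, Or.inr hj, h2⟩
    · rintro (h | ⟨h1, j, (rfl | hj), h2⟩)
      · exact Or.inl (Or.inl h)
      · exact Or.inl (Or.inr ⟨h1, h2⟩)
      · exact Or.inr ⟨h1, j, hj, h2⟩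

lemma contains_pvHits (n : List Char) (x : String) (hx : x ∈ pvKeywords) :
    PySem.Set.contains (pvHits n) x = PySem.Chars.isIn x.toList n := by
  have hne : x.toList ≠ [] := by
    fin_cases hx <;> decide
  rw [Bool.eq_iff_iff, PySem.Set.contains_iff, ← PySem.Chars.exists_prefix_drop_iff_isIn]
  unfold pvHits
  rw [mem_foldl_pvScanAt]
  simp only [PySem.Set.empty, List.not_mem_nil, false_or]
  constructor
  · rintro ⟨-, i, hi, h2⟩
    exact ⟨i.toNat, (PySem.Chars.startswith_iff _ _).mp h2⟩
  · rintro ⟨j, hj⟩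
    refine ⟨hx, (j : Int), ?_, ?_⟩
    · rw [PySem.List.mem_pyRange_one]
      constructor
      · exact Int.natCast_nonneg j
      · by_contra hlt
        push Not at hlt
        have : n.length ≤ j := by exact_mod_cast hlt
        rw [List.drop_eq_nil_of_le this] at hj
        exact hne (List.prefix_nil.mp hj)
    · rw [PySem.Chars.startswith_iff]
      simpa using hj

-- ===== VERDICT (by name: the statement is the Claim_ definition above) =====
set_option maxHeartbeats 2000000 in
theorem model_name_format_spec : Claim_equal_model_name_format := by
  intro name _
  unfold Spec_model_name_format model_name_format model_name_format_alt
  simp only [pvRunSpecs, pvSpecs, pvPickSize, pvFallback, List.any_cons, List.any_nil]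
  have hk0 := fun m => contains_pvHits m "llama-2" (by decide)
  have hk1 := fun m => contains_pvHits m "llama2" (by decide)
  have hk2 := fun m => contains_pvHits m "llama-3" (by decide)
  have hk3 := fun m => contains_pvHits m "llama3" (by decide)
  have hk4 := fun m => contains_pvHits m "gemma" (by decide)
  have hk5 := fun m => contains_pvHits m "mistral" (by decide)
  have hk6 := fun m => contains_pvHits m "mixtral" (by decide)
  have hk7 := fun m => contains_pvHits m "chat" (by decide)
  have hk8 := fun m => contains_pvHits m "instruct" (by decide)
  have hk9 := fun m => contains_pvHits m "it" (by decide)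
  have hk10 := fun m => contains_pvHits m "7b" (by decide)
  have hk11 := fun m => contains_pvHits m "13b" (by decide)
  have hk12 := fun m => contains_pvHits m "70b" (by decide)
  have hk13 := fun m => contains_pvHits m "8b" (by decide)
  have hk14 := fun m => contains_pvHits m "2b" (by decide)
  have hk15 := fun m => contains_pvHits m "8x7b" (by decide)
  simp only [hk0, hk1, hk2, hk3, hk4, hk5, hk6, hk7, hk8, hk9, hk10, hk11, hk12, hk13, hk14, hk15]
  simp only [PySem.Str.isIn_eq, Bool.or_false, Bool.and_true, Bool.or_self]
  simp only [show ("Llama 2" ++ " " : String) = "Llama 2 " from rfl,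
    show ("Llama 3" ++ " " : String) = "Llama 3 " from rfl,
    show ("Gemma" ++ " " : String) = "Gemma " from rfl,
    show ("Mistral" ++ " " : String) = "Mistral " from rfl,
    show ("Mixtral" ++ " " : String) = "Mixtral " from rfl]
  rfl
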